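-- pv_equiv track=rewrite | github.com/OdedRoz/MEMM_Part_of_Speech_Tagging | Features2.py | get_word_form
-- ===== SOURCE A (Python) =====
-- def get_word_form(word, is_first):
--     temp_word_form = ''
--     temp_word_len = 0
--     for char in word:
--         if char.isupper():
--             if temp_word_form[-1:] != 'X':
--                 temp_word_form += 'X'
--         elif char.islower():
--             if temp_word_form[-1:] != 'x':
--                 temp_word_form += 'x'
--         elif char.isdigit():
--             if temp_word_form[-1:] != 'd':
--                 temp_word_form += 'd'
--         else:
--             if temp_word_form[-1:] != char:
--                 temp_word_form += char
--         temp_word_len += 1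
--     return (temp_word_form, is_first)
-- ===== SOURCE B (Python) =====
-- def _classify(ch):
--     if ch.isupper():
--         return 'X'
--     if ch.islower():
--         return 'x'
--     if ch.isdigit():
--         return 'd'
--     return ch
--
-- def get_word_form(word, is_first):
--     codes = [_classify(ch) for ch in word]
--     if not codes:
--         return ('', is_first)
--     kept = [b for a, b in zip(codes, codes[1:]) if b != a]
--     return (codes[0] + ''.join(kept), is_first)
-- ===== Notes on version B (the rewrite author's own statement) =====
-- stated objective: idiomatic
-- what changed: B first maps every character to its class code in one comprehension and then collapses adjacent duplicate codes by zipping the code list with its own tail and filtering, instead of A's stateful loop that classifies and inspects the growing output string's last character at the same time.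
import Mathlib
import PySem

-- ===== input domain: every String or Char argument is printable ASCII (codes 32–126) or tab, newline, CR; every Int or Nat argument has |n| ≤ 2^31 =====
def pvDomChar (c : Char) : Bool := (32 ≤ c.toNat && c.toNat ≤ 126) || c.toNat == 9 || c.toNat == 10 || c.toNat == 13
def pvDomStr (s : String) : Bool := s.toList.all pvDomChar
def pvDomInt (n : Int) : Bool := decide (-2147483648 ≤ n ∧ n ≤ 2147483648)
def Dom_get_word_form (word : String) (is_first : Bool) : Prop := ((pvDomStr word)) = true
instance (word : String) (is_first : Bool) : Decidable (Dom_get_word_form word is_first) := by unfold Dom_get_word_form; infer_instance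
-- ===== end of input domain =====

-- B re-states A's classify-and-collapse loop as map-then-adjacent-dedup (idiomatic decomposition, same cost).


-- ===== PORT A =====
-- loop body of A; the accumulator carries (temp_word_form as a char list, temp_word_len).
-- 'temp_word_form[-1:] != c' is checked as getLast? ≠ some c — exact, since the slice [-1:]
-- is the last character of the string, or empty when the string is empty.
def getWordStep (st : List Char × Int) (c : Char) : List Char × Int :=
  let form := st.1
  let form' :=
    if PySem.Chars.isupper c then
      (if form.getLast? ≠ some 'X' then form ++ ['X'] else form)
    else if PySem.Chars.islower c then
      (if form.getLast? ≠ some 'x' then form ++ ['x'] else form)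
    else if PySem.Chars.isdigit c then
      (if form.getLast? ≠ some 'd' then form ++ ['d'] else form)
    else
      (if form.getLast? ≠ some c then form ++ [c] else form)
  (form', st.2 + 1)

def get_word_form (word : String) (is_first : Bool) : String × Bool :=
  let st := word.toList.foldl getWordStep ([], 0)
  (String.mk st.1, is_first)

-- ===== PORT B =====
def classifyChar (c : Char) : Char :=
  if PySem.Chars.isupper c then 'X'
  else if PySem.Chars.islower c then 'x'
  else if PySem.Chars.isdigit c then 'd'
  else c

def get_word_form_alt (word : String) (is_first : Bool) : String × Bool :=
  let codes := word.toList.map classifyChar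
  match h : codes with
  | [] => ("", is_first)
  | c0 :: rest =>
    let kept := (codes.zip rest).filterMap (fun p => if p.2 ≠ p.1 then some p.2 else none)
    (String.mk (c0 :: kept), is_first)

-- ===== PRECONDITION & SPEC =====
def Spec_get_word_form (word : String) (is_first : Bool) (out : String × Bool) : Prop := out = get_word_form_alt word is_first
instance (word : String) (is_first : Bool) (out : String × Bool) : Decidable (Spec_get_word_form word is_first out) := by unfold Spec_get_word_form; infer_instance

-- ===== CLAIM (what is proved, stated in full; the proofs are below) =====
def Claim_equal_get_word_form : Prop := ∀ (word : String) (is_first : Bool), Dom_get_word_form word is_first → Spec_get_word_form word is_first (get_word_form word is_first)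

-- ===== LEMMAS AND PROOFS =====

-- proof-side abstractions
def stepK (form : List Char) (k : Char) : List Char :=
  if form.getLast? ≠ some k then form ++ [k] else form

def runC (a : Char) (cs : List Char) : List Char :=
  ((a :: cs).zip cs).filterMap (fun p => if p.2 ≠ p.1 then some p.2 else none)

theorem runC_cons (a b : Char) (cs : List Char) :
    runC a (b :: cs) = (if b ≠ a then [b] else []) ++ runC b cs := by
  simp only [runC, List.zip_cons_cons, List.filterMap_cons]
  split_ifs <;> simp_all

theorem getWordStep_fst (st : List Char × Int) (c : Char) :
    (getWordStep st c).1 = stepK st.1 (classifyChar c) := by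
  simp only [getWordStep, stepK, classifyChar]
  split_ifs <;> simp_all

theorem foldl_getWordStep_fst (l : List Char) (f : List Char) (n : Int) :
    (l.foldl getWordStep (f, n)).1 = (l.map classifyChar).foldl stepK f := by
  induction l generalizing f n with
  | nil => rfl
  | cons c l ih =>
    simp only [List.foldl_cons, List.map_cons]
    rw [ih]
    congr 1
    exact getWordStep_fst (f, n) c

theorem foldl_stepK_run (cs : List Char) (a : Char) (l : List Char) :
    cs.foldl stepK (l ++ [a]) = l ++ a :: runC a cs := by
  induction cs generalizing a l with
  | nil => simp [runC]
  | cons b cs ih =>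
    simp only [List.foldl_cons]
    by_cases hba : b = a
    · subst hba
      have : stepK (l ++ [b]) b = l ++ [b] := by
        simp [stepK, List.getLast?_concat]
      rw [this, ih, runC_cons]
      simp
    · have : stepK (l ++ [a]) b = (l ++ [a]) ++ [b] := by
        simp only [stepK, List.getLast?_concat, ne_eq, Option.some.injEq]
        rw [if_pos (fun h => hba h.symm)]
      rw [this, List.append_assoc] at *
      rw [show (l ++ ([a] ++ [b])) = (l ++ [a]) ++ [b] by simp, ih, runC_cons]
      simp [hba]

-- ===== VERDICT (by name: the statement is the Claim_ definition above) =====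
theorem get_word_form_spec : Claim_equal_get_word_form := by
  intro word is_first _
  unfold Spec_get_word_form get_word_form get_word_form_alt
  cases hw : word.toList with
  | nil => simp only [hw, List.foldl_nil, List.map_nil]; rfl
  | cons c l =>
    simp only [hw, List.map_cons, List.foldl_cons]
    have h1 := foldl_getWordStep_fst l (getWordStep ([], 0) c).1 (getWordStep ([], 0) c).2
    have hc : (getWordStep ([], 0) c).1 = [classifyChar c] := by
      rw [getWordStep_fst]; simp [stepK]
    simp only [Prod.mk.eta] at h1
    have h2 : (l.map classifyChar).foldl stepK [classifyChar c]
        = classifyChar c :: runC (classifyChar c) (l.map classifyChar) := by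
      have := foldl_stepK_run (l.map classifyChar) (classifyChar c) []
      simpa using this
    simp [h1, hc, h2, runC]
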